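-- pv_equiv track=rewrite | github.com/eukaryo/czno | clote_misc.py | basePairDistBetweenDotBracketNotations
-- ===== SOURCE A (Python) =====
-- def basePairList(secStr):
--   L = []; stack = []
--   for i in range(len(secStr)):
--     if secStr[i]=="(":
--       stack.append(i)
--     elif secStr[i]==")":
--       x = stack.pop() #return and pop end of stack
--       L.append( (x,i) )
--   return L
--
-- def basePairDistBetweenDotBracketNotations(secStr1,secStr2):
--   X = basePairList(secStr1)
--   Y = basePairList(secStr2)
--   sum = 0
--   for bp in X:
--     if bp not in Y:
--       sum += 1
--   for bp in Y:
--     if bp not in X: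
--       sum += 1
--   return sum
-- ===== SOURCE B (Python) =====
-- def closeToOpen(secStr):
--   D = {}; stack = []
--   for i, c in enumerate(secStr):
--     if c == "(":
--       stack.append(i)
--     elif c == ")":
--       D[i] = stack.pop()  # same IndexError on an unmatched ")"
--   return D
--
-- def basePairDistBetweenDotBracketNotations(secStr1, secStr2):
--   D1 = closeToOpen(secStr1)
--   D2 = closeToOpen(secStr2)
--   common = 0
--   for i, x in D1.items():
--     if D2.get(i) == x:
--       common += 1
--   return len(D1) + len(D2) - 2 * common
-- ===== Notes on version B (the rewrite author's own statement) =====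
-- stated objective: alternative
-- what changed: B maps each closing-bracket index to its matching opening index in a dict per string, counts the common pairs in a single dict-lookup pass, and returns len(D1)+len(D2)-2*common by inclusion-exclusion, instead of A's two pair lists with 'not in' membership scans.
import Mathlib
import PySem

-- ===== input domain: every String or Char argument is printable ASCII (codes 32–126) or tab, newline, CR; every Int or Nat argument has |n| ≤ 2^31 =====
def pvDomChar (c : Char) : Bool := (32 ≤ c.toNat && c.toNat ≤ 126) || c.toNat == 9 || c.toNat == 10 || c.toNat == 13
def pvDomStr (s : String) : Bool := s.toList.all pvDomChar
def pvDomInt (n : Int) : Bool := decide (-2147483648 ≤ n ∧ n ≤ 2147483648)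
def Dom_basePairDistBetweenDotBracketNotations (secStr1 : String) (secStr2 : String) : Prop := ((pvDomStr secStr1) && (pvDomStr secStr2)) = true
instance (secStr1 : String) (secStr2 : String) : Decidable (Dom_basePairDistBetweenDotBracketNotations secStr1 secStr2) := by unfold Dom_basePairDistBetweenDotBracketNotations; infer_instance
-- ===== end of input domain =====

-- B replaces A's two 'not in' membership scans by per-string close→open dicts, one
-- common-pair counting pass, and the inclusion-exclusion formula len1+len2-2*common.

-- ===== PORT A =====
-- one step of basePairList's loop body; `none` = IndexError from stack.pop() on an empty stack
def bplStep (acc : Option (List (Int × Int) × List Int)) (ic : Int × Char) :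
    Option (List (Int × Int) × List Int) :=
  acc.bind fun Ls =>
    if ic.2 = '(' then some (Ls.1, ic.1 :: Ls.2)
    else if ic.2 = ')' then
      match Ls.2 with
      | [] => none
      | x :: rest => some (Ls.1 ++ [(x, ic.1)], rest)
    else some Ls

def basePairList? (secStr : String) : Option (List (Int × Int)) :=
  ((PySem.List.enumerate secStr.toList 0).foldl bplStep (some ([], []))).map (·.1)

def basePairDistBetweenDotBracketNotations (secStr1 : String) (secStr2 : String) : Int :=
  match basePairList? secStr1, basePairList? secStr2 with
  | some X, some Y =>
    let sum1 : Int := X.foldl (fun acc bp => if bp ∈ Y then acc else acc + 1) 0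
    Y.foldl (fun acc bp => if bp ∈ X then acc else acc + 1) sum1
  | _, _ => 0   -- unreachable under Pre_ (Python raises IndexError here)

-- ===== PORT B =====
-- one step of closeToOpen's loop body; `none` = the same IndexError from stack.pop()
def ctoStep (acc : Option (PySem.Dict Int Int × List Int)) (ic : Int × Char) :
    Option (PySem.Dict Int Int × List Int) :=
  acc.bind fun Ds =>
    if ic.2 = '(' then some (Ds.1, ic.1 :: Ds.2)
    else if ic.2 = ')' then
      Ds.2.head?.map fun x => (Ds.1.insert ic.1 x, Ds.2.tail)
    else some Ds

def closeToOpen? (secStr : String) : Option (PySem.Dict Int Int) :=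
  ((PySem.List.enumerate secStr.toList 0).foldl ctoStep (some (PySem.Dict.empty, []))).map (·.1)

def basePairDistBetweenDotBracketNotations_alt (secStr1 : String) (secStr2 : String) : Int :=
  (((closeToOpen? secStr1).bind fun D1 => (closeToOpen? secStr2).map fun D2 =>
    let common : Int := D1.items.foldl (fun acc p => if D2.get? p.1 = some p.2 then acc + 1 else acc) 0
    (D1.size : Int) + (D2.size : Int) - 2 * common)).getD 0
  -- the `.getD 0` branch is unreachable under Pre_ (Python raises IndexError there)

-- ===== PRECONDITION & SPEC =====
-- Pre_ excludes exactly the inputs where stack.pop() raises IndexError in BOTH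
-- programs: some prefix of one string contains more ')' than '('.
def balOK (cs : List Char) : Prop :=
  ∀ n : Nat, n < cs.length + 1 → (cs.take n).count ')' ≤ (cs.take n).count '('

def Pre_basePairDistBetweenDotBracketNotations (secStr1 : String) (secStr2 : String) : Prop :=
  balOK secStr1.toList ∧ balOK secStr2.toList

instance (secStr1 : String) (secStr2 : String) : Decidable (Pre_basePairDistBetweenDotBracketNotations secStr1 secStr2) := by
  unfold Pre_basePairDistBetweenDotBracketNotations balOK; infer_instance

def pvWitness_basePairDistBetweenDotBracketNotations : String × String := ("((.))", "(.)()")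

def Spec_basePairDistBetweenDotBracketNotations (secStr1 : String) (secStr2 : String) (out : Int) : Prop := out = basePairDistBetweenDotBracketNotations_alt secStr1 secStr2
instance (secStr1 : String) (secStr2 : String) (out : Int) : Decidable (Spec_basePairDistBetweenDotBracketNotations secStr1 secStr2 out) := by unfold Spec_basePairDistBetweenDotBracketNotations; infer_instance

-- ===== CLAIM (what is proved, stated in full; the proofs are below) =====
def Claim_equal_basePairDistBetweenDotBracketNotations : Prop := ∀ (secStr1 : String) (secStr2 : String), Dom_basePairDistBetweenDotBracketNotations secStr1 secStr2 → Pre_basePairDistBetweenDotBracketNotations secStr1 secStr2 → Spec_basePairDistBetweenDotBracketNotations secStr1 secStr2 (basePairDistBetweenDotBracketNotations secStr1 secStr2)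

-- ===== LEMMAS AND PROOFS =====

-- folding from a `none` accumulator stays `none`
lemma foldl_bplStep_none (cs : List (Int × Char)) : cs.foldl bplStep none = none := by
  induction cs with
  | nil => rfl
  | cons c cs ih => simpa [bplStep] using ih

lemma foldl_ctoStep_none (cs : List (Int × Char)) : cs.foldl ctoStep none = none := by
  induction cs with
  | nil => rfl
  | cons c cs ih => simpa [ctoStep] using ih

-- the two loops run in lock-step: the dict's items are always the pair list with
-- each pair swapped, and the pair list's close indices stay below the running index
lemma par (xs : List Char) : ∀ (j : Int) (L : List (Int × Int)) (stack : List Int),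
    (∀ p ∈ L, p.2 < j) →
    ((PySem.List.enumerate xs j).foldl ctoStep
        (some (PySem.Dict.mk (L.map (fun p => (p.2, p.1))), stack)) =
      ((PySem.List.enumerate xs j).foldl bplStep (some (L, stack))).map
        (fun ls => (PySem.Dict.mk (ls.1.map (fun p => (p.2, p.1))), ls.2))) ∧
    (∀ L' st', (PySem.List.enumerate xs j).foldl bplStep (some (L, stack)) = some (L', st') →
        ((∀ p ∈ L', p.2 < j + xs.length) ∧
         ((L.map Prod.snd).Pairwise (· < ·) → (L'.map Prod.snd).Pairwise (· < ·)))) := by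
  induction xs with
  | nil =>
    intro j L stack hlt
    refine ⟨rfl, ?_⟩
    rintro L' st' h
    simp only [PySem.List.enumerate_nil, List.foldl_nil, Option.some.injEq, Prod.mk.injEq] at h
    obtain ⟨rfl, rfl⟩ := h
    exact ⟨fun p hp => by simpa using hlt p hp, fun h => h⟩
  | cons c xs ih =>
    intro j L stack hlt
    rw [PySem.List.enumerate_cons]
    by_cases hop : c = '('
    · simp only [List.foldl_cons, bplStep, ctoStep, Option.bind_some, hop]
      have := ih (j + 1) L (j :: stack) (fun p hp => lt_trans (hlt p hp) (by omega))
      refine ⟨this.1, ?_⟩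
      intro L' st' h
      obtain ⟨h1, h2⟩ := this.2 L' st' h
      exact ⟨fun p hp => by have := h1 p hp; simp only [List.length_cons] at *; push_cast at *; omega, h2⟩
    · by_cases hcl : c = ')'
      · cases stack with
        | nil =>
          simp only [List.foldl_cons, bplStep, ctoStep, Option.bind_some, if_neg hop,
            if_pos hcl, List.head?_nil, Option.map_none]
          refine ⟨?_, ?_⟩
          · rw [foldl_ctoStep_none, foldl_bplStep_none]; rfl
          · intro L' st' h; rw [foldl_bplStep_none] at h; exact absurd h (by simp)
        | cons x rest =>
          have hfresh : (PySem.Dict.mk (L.map (fun p => (p.2, p.1)))).contains j = false := by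
            rw [PySem.Dict.contains_eq_decide_mem_keys]
            simp only [decide_eq_false_iff_not, PySem.Dict.keys_mk, List.map_map, List.mem_map]
            rintro ⟨p, hp, hpj⟩
            have := hlt p hp
            simp only [Function.comp] at hpj
            omega
          have hins : (PySem.Dict.mk (L.map (fun p => (p.2, p.1)))).insert j x =
              PySem.Dict.mk ((L ++ [(x, j)]).map (fun p => (p.2, p.1))) := by
            apply PySem.Dict.ext
            simp [PySem.Dict.items_insert, hfresh]
          simp only [List.foldl_cons, bplStep, ctoStep, Option.bind_some, if_neg hop,
            if_pos hcl, List.head?_cons, List.tail_cons, Option.map_some, hins]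
          have hlt' : ∀ p ∈ L ++ [(x, j)], p.2 < j + 1 := by
            intro p hp
            rcases List.mem_append.1 hp with h | h
            · exact lt_trans (hlt p h) (by omega)
            · simp only [List.mem_singleton] at h; subst h; omega
          have := ih (j + 1) (L ++ [(x, j)]) rest hlt'
          refine ⟨this.1, ?_⟩
          intro L' st' h
          obtain ⟨h1, h2⟩ := this.2 L' st' h
          refine ⟨fun p hp => by have := h1 p hp; simp only [List.length_cons] at *; push_cast at *; omega, ?_⟩
          intro hpw
          apply h2
          simp only [List.map_append, List.map_cons, List.map_nil]
          rw [List.pairwise_append]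
          refine ⟨hpw, List.pairwise_singleton _ _, ?_⟩
          intro a ha b hb
          simp only [List.mem_singleton] at hb
          subst hb
          obtain ⟨p, hp, rfl⟩ := List.mem_map.1 ha
          exact hlt p hp
      · simp only [List.foldl_cons, bplStep, ctoStep, Option.bind_some, if_neg hop,
          if_neg hcl]
        have := ih (j + 1) L stack (fun p hp => lt_trans (hlt p hp) (by omega))
        refine ⟨this.1, ?_⟩
        intro L' st' h
        obtain ⟨h1, h2⟩ := this.2 L' st' h
        exact ⟨fun p hp => by have := h1 p hp; simp only [List.length_cons] at *; push_cast at *; omega, h2⟩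

-- instantiating `par` at the real starting state
lemma closeToOpen?_eq (s : String) :
    closeToOpen? s = (basePairList? s).map (fun X => PySem.Dict.mk (X.map (fun p => (p.2, p.1)))) := by
  have h := (par s.toList 0 [] [] (by simp)).1
  unfold closeToOpen? basePairList?
  have hempty : (PySem.Dict.empty : PySem.Dict Int Int) = PySem.Dict.mk (([] : List (Int × Int)).map (fun p => (p.2, p.1))) := by
    apply PySem.Dict.ext; simp [PySem.Dict.empty]
  rw [hempty, h]
  cases (PySem.List.enumerate s.toList 0).foldl bplStep (some ([], [])) <;> rfl

lemma bpl_snd_pairwise {s : String} {X : List (Int × Int)} (h : basePairList? s = some X) :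
    (X.map Prod.snd).Pairwise (· < ·) := by
  unfold basePairList? at h
  cases hf : (PySem.List.enumerate s.toList 0).foldl bplStep (some ([], [])) with
  | none => rw [hf] at h; exact absurd h (by simp)
  | some Ls =>
    rw [hf] at h
    simp only [Option.map_some, Option.some.injEq] at h
    subst h
    exact ((par s.toList 0 [] [] (by simp)).2 Ls.1 Ls.2 (by rw [hf])).2 (by simp)

-- A's accumulating loop with the flipped branch IS a countP
lemma foldl_not_mem_count (X Y : List (Int × Int)) (a : Int) :
    X.foldl (fun acc bp => if bp ∈ Y then acc else acc + 1) a
      = a + (X.countP (fun bp => !decide (bp ∈ Y)) : Int) := by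
  have : (fun (acc : Int) bp => if bp ∈ Y then acc else acc + 1)
      = (fun acc bp => if (!decide (bp ∈ Y)) = true then acc + 1 else acc) := by
    funext acc bp; by_cases h : bp ∈ Y <;> simp [h]
  rw [this, PySem.List.foldl_if_add_one]

-- B's counting loop over the swapped items IS countP (· ∈ Y) on X, when Y's dict has nodup keys
lemma mem_swap_map (Y : List (Int × Int)) (a b : Int) :
    (a, b) ∈ Y.map (fun q => (q.2, q.1)) ↔ (b, a) ∈ Y := by
  constructor
  · intro h
    obtain ⟨q, hq, hEq⟩ := List.mem_map.1 h
    obtain ⟨h1, h2⟩ := Prod.mk.injEq .. ▸ hEq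
    have : q = (b, a) := Prod.ext (by simp [h2]) (by simp [h1])
    rwa [this] at hq
  · intro h
    exact List.mem_map.2 ⟨(b, a), h, rfl⟩

lemma common_count (X Y : List (Int × Int)) (hY : ((Y.map (fun p => (p.2, p.1))).map Prod.fst).Nodup) :
    (X.map (fun p => (p.2, p.1))).foldl
        (fun acc p => if (PySem.Dict.mk (Y.map (fun p => (p.2, p.1)))).get? p.1 = some p.2 then acc + 1 else acc) (0 : Int)
      = (X.countP (fun bp => decide (bp ∈ Y)) : Int) := by
  have h1 : ∀ (p : Int × Int),
      ((PySem.Dict.mk (Y.map (fun p => (p.2, p.1)))).get? p.1 = some p.2) ↔ ((p.2, p.1) ∈ Y) := by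
    intro p
    have hmem := PySem.Dict.get?_eq_some_iff_mem_items (d := PySem.Dict.mk (Y.map (fun p => (p.2, p.1))))
      (k := p.1) (v := p.2) (by simpa [PySem.Dict.keys_mk] using hY)
    rw [hmem]
    simpa using mem_swap_map Y p.1 p.2
  have hfun : (fun (acc : Int) (p : Int × Int) => if (PySem.Dict.mk (Y.map (fun p => (p.2, p.1)))).get? p.1 = some p.2 then acc + 1 else acc)
      = (fun acc p => if (decide ((p.2, p.1) ∈ Y)) = true then acc + 1 else acc) := by
    funext acc p
    by_cases h : (PySem.Dict.mk (Y.map (fun p => (p.2, p.1)))).get? p.1 = some p.2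
    · rw [if_pos h, if_pos (by simpa using (h1 p).1 h)]
    · rw [if_neg h, if_neg (by simp only [decide_eq_true_eq]; exact fun hm => h ((h1 p).2 hm))]
  rw [hfun, PySem.List.foldl_if_add_one, List.countP_map]
  norm_num
  apply List.countP_congr
  intro p _
  simp [Function.comp]

-- a list splits into the elements satisfying a test and those failing it
lemma countP_not_mem_add (X Y : List (Int × Int)) :
    X.countP (fun bp => !decide (bp ∈ Y)) + X.countP (fun bp => decide (bp ∈ Y)) = X.length := by
  have h := List.length_eq_countP_add_countP (l := X) (p := fun bp => decide (bp ∈ Y))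
  simp at h ⊢
  omega

-- for nodup lists, counting X-elements in Y equals counting Y-elements in X
lemma countP_mem_comm (X Y : List (Int × Int)) (hX : X.Nodup) (hY : Y.Nodup) :
    X.countP (fun bp => decide (bp ∈ Y)) = Y.countP (fun bp => decide (bp ∈ X)) := by
  have key : ∀ (A B : List (Int × Int)), A.Nodup →
      A.countP (fun bp => decide (bp ∈ B)) = (A.toFinset ∩ B.toFinset).card := by
    intro A B hA
    rw [List.countP_eq_length_filter]
    have hnd : (A.filter (fun bp => decide (bp ∈ B))).Nodup := hA.filter _
    rw [← List.toFinset_card_of_nodup hnd, List.toFinset_filter]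
    congr 1
    ext p
    simp [Finset.mem_inter, List.mem_toFinset]
  rw [key X Y hX, key Y X hY, Finset.inter_comm]

-- ===== VERDICT (by name: the statement is the Claim_ definition above) =====
theorem basePairDistBetweenDotBracketNotations_spec : Claim_equal_basePairDistBetweenDotBracketNotations := by
  intro s1 s2 _ _
  unfold Spec_basePairDistBetweenDotBracketNotations
  unfold basePairDistBetweenDotBracketNotations basePairDistBetweenDotBracketNotations_alt
  rw [closeToOpen?_eq s1, closeToOpen?_eq s2]
  cases h1 : basePairList? s1 with
  | none => rfl
  | some X =>
    cases h2 : basePairList? s2 with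
    | none => rfl
    | some Y =>
      simp only [Option.map_some, Option.bind_some, Option.getD_some]
      have hXp := bpl_snd_pairwise h1
      have hYp := bpl_snd_pairwise h2
      have hXn : X.Nodup := List.Nodup.of_map _ (hXp.imp ne_of_lt)
      have hYn : Y.Nodup := List.Nodup.of_map _ (hYp.imp ne_of_lt)
      have hYkeys : ((Y.map (fun p => (p.2, p.1))).map Prod.fst).Nodup := by
        have : (Y.map (fun p => (p.2, p.1))).map Prod.fst = Y.map Prod.snd := by
          simp [List.map_map, Function.comp]
        rw [this]
        exact hYp.imp ne_of_lt
      rw [foldl_not_mem_count X Y 0, foldl_not_mem_count Y X]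
      rw [common_count X Y hYkeys]
      have hsize1 : (PySem.Dict.mk (X.map (fun p => (p.2, p.1)))).size = X.length := by
        simp [PySem.Dict.size]
      have hsize2 : (PySem.Dict.mk (Y.map (fun p => (p.2, p.1)))).size = Y.length := by
        simp [PySem.Dict.size]
      rw [hsize1, hsize2]
      have hcomm := countP_mem_comm X Y hXn hYn
      have hcX := countP_not_mem_add X Y
      have hcY := countP_not_mem_add Y X
      omega
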